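-- pv_equiv track=rewrite | github.com/Griffon26/taserver | scripts/parse.py | merge_value_dicts
-- ===== SOURCE A (Python) =====
-- from typing import TypeVar, cast, Optional, List, Union, Set, Dict, Tuple, Generator, TextIO, BinaryIO, NamedTuple
--
-- K = TypeVar('K')
--
-- V = TypeVar('V')
--
-- def merge_value_dicts(dict_list: List[Dict[K, Set[V]]]) -> Dict[K, Set[V]]:
--     result_dict = dict()
--     for dictionary in dict_list:
--         for key, value_set in dictionary.items():
--             if key not in result_dict:
--                 result_dict[key] = set()
--                 result_dict[key].update(value_set)
--     return result_dict
-- ===== SOURCE B (Python) =====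
-- def merge_value_dicts(dict_list):
--     merged = {}
--     for d in reversed(dict_list):
--         head = {key: set(values) for key, values in d.items()}
--         merged = {**head, **{key: values for key, values in merged.items() if key not in head}}
--     return merged
-- ===== Notes on version B (the rewrite author's own statement) =====
-- stated objective: alternative
-- what changed: B replaces A's left-to-right nested loops with guarded per-item in-place insertions by a right fold: walk the dict list in reverse and at each step rebuild the merged dict by laying the current dict (with fresh set copies) over it, so earlier dicts take precedence wholesale.
import Mathlib
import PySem

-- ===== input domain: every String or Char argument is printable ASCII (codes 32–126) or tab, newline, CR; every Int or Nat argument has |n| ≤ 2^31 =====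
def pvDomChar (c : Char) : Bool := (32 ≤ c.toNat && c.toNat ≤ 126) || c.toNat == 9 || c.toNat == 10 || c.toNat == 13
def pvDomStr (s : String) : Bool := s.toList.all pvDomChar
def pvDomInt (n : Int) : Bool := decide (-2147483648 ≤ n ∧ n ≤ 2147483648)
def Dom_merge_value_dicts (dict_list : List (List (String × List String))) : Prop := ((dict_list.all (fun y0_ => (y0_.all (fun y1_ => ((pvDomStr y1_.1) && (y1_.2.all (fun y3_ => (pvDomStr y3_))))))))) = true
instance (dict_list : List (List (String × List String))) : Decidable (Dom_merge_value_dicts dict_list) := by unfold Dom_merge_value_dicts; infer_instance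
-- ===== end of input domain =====

-- B folds the dict list from the right, laying each dict (with fresh set copies) over the merge
-- of the later ones, instead of A's left-to-right per-item guarded insertions; same return value.
-- ===== PORT A =====
def merge_value_dicts (dict_list : List (List (String × List String))) : List (String × List String) :=
  (dict_list.foldl (fun result_dict dictionary =>
      (PySem.Dict.ofList dictionary).items.foldl (fun result_dict kv =>
        if result_dict.contains kv.1 then result_dict
        else result_dict.insert kv.1 (PySem.Set.update PySem.Set.empty kv.2))
      result_dict)
    PySem.Dict.empty).items

-- ===== PORT B =====
-- {**head, **new} with new's keys disjoint from head's keys is head's items followed by new's.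
def merge_value_dicts_alt (dict_list : List (List (String × List String))) : List (String × List String) :=
  dict_list.reverse.foldl (fun merged d =>
    let head := (PySem.Dict.ofList d).items.map (fun kv => (kv.1, PySem.Set.ofList kv.2))
    head ++ merged.filter (fun kv => !((head.map Prod.fst).contains kv.1)))
  []

-- ===== PRECONDITION & SPEC =====
def Spec_merge_value_dicts (dict_list : List (List (String × List String))) (out : List (String × List String)) : Prop := out = merge_value_dicts_alt dict_list
instance (dict_list : List (List (String × List String))) (out : List (String × List String)) : Decidable (Spec_merge_value_dicts dict_list out) := by unfold Spec_merge_value_dicts; infer_instance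

-- ===== CLAIM (what is proved, stated in full; the proofs are below) =====
def Claim_equal_merge_value_dicts : Prop := ∀ (dict_list : List (List (String × List String))), Dom_merge_value_dicts dict_list → Spec_merge_value_dicts dict_list (merge_value_dicts dict_list)

-- ===== LEMMAS AND PROOFS =====

lemma keys_foldA (l : List (String × List String)) (d : PySem.Dict String (List String)) :
    (l.foldl (fun r kv =>
        if r.contains kv.1 then r else r.insert kv.1 (PySem.Set.update PySem.Set.empty kv.2)) d).keys
      = PySem.Set.update d.keys (l.map (fun kv => kv.1)) := by
  induction l generalizing d with
  | nil => simp [PySem.Set.update_nil]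
  | cons kv l ih =>
    rw [List.foldl_cons, List.map_cons, PySem.Set.update_cons]
    by_cases h : d.contains kv.1
    · rw [if_pos h, ih, PySem.Set.add_of_mem ((PySem.Dict.contains_iff_mem_keys d kv.1).mp h)]
    · rw [if_neg h, ih, PySem.Dict.keys_insert_of_not_contains d _ (by simpa using h),
        PySem.Set.add_of_not_mem (fun hm => h ((PySem.Dict.contains_iff_mem_keys d kv.1).mpr hm))]

lemma items_foldA (l : List (String × List String)) (r : PySem.Dict String (List String))
    (hnd : (l.map (fun kv => kv.1)).Nodup) :
    (l.foldl (fun r kv =>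
        if r.contains kv.1 then r else r.insert kv.1 (PySem.Set.update PySem.Set.empty kv.2)) r).items
      = r.items ++ (l.map (fun kv => (kv.1, PySem.Set.ofList kv.2))).filter
          (fun kv => !(r.contains kv.1)) := by
  induction l generalizing r with
  | nil => simp
  | cons kv l ih =>
    rw [List.map_cons] at hnd ⊢
    obtain ⟨hk, hl⟩ := List.nodup_cons.mp hnd
    rw [List.foldl_cons]
    by_cases h : r.contains kv.1
    · rw [if_pos h, ih _ hl, List.filter_cons_of_neg (by simp [h])]
    · rw [if_neg h, ih _ hl, List.filter_cons_of_pos (by simp [h]),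
        PySem.Dict.items_insert_of_not_contains _ _ (by simpa using h)]
      have hfilt : (l.map (fun kv => (kv.1, PySem.Set.ofList kv.2))).filter
            (fun p => !((r.insert kv.1 (PySem.Set.update PySem.Set.empty kv.2)).contains p.1))
          = (l.map (fun kv => (kv.1, PySem.Set.ofList kv.2))).filter (fun p => !(r.contains p.1)) := by
        apply List.filter_congr
        intro p hp
        obtain ⟨q, hq, rfl⟩ := List.mem_map.mp hp
        have hne : q.1 ≠ kv.1 := fun e => hk (e ▸ List.mem_map.mpr ⟨q, hq, rfl⟩)
        simp [PySem.Dict.contains_insert, hne]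
      rw [hfilt]
      simp [PySem.Set.update_nil_left]

lemma contains_foldA (l : List (String × List String)) (r : PySem.Dict String (List String))
    (k : String) :
    (l.foldl (fun r kv =>
        if r.contains kv.1 then r else r.insert kv.1 (PySem.Set.update PySem.Set.empty kv.2)) r).contains k
      = (r.contains k || (l.map (fun kv => kv.1)).contains k) := by
  rw [PySem.Dict.contains_eq_decide_mem_keys, keys_foldA]
  by_cases h1 : k ∈ r.keys <;> by_cases h2 : k ∈ l.map (fun kv => kv.1) <;>
    simp [PySem.Dict.contains_eq_decide_mem_keys, PySem.Set.mem_update, h1, h2]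

lemma nodup_keys_foldA (l : List (String × List String)) (r : PySem.Dict String (List String))
    (hr : r.keys.Nodup) :
    (l.foldl (fun r kv =>
        if r.contains kv.1 then r else r.insert kv.1 (PySem.Set.update PySem.Set.empty kv.2)) r).keys.Nodup := by
  rw [keys_foldA]; exact PySem.Set.nodup_update _ _ hr

lemma foldA_main (ds : List (List (String × List String))) (r : PySem.Dict String (List String))
    (hr : r.keys.Nodup) :
    (ds.foldl (fun result_dict dictionary =>
        (PySem.Dict.ofList dictionary).items.foldl (fun result_dict kv =>
          if result_dict.contains kv.1 then result_dict
          else result_dict.insert kv.1 (PySem.Set.update PySem.Set.empty kv.2))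
        result_dict) r).items
      = r.items ++ (merge_value_dicts_alt ds).filter (fun kv => !(r.contains kv.1)) := by
  induction ds generalizing r with
  | nil => simp [merge_value_dicts_alt]
  | cons d ds ih =>
    have hnd : ((PySem.Dict.ofList d).items.map (fun kv => kv.1)).Nodup := by
      have := PySem.Dict.nodup_keys_ofList (κ := String) (ν := List String) d
      simpa [PySem.Dict.keys] using this
    rw [List.foldl_cons, ih _ (nodup_keys_foldA _ _ hr), items_foldA _ _ hnd]
    have haltcons : merge_value_dicts_alt (d :: ds)
        = ((PySem.Dict.ofList d).items.map (fun kv => (kv.1, PySem.Set.ofList kv.2)))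
          ++ (merge_value_dicts_alt ds).filter
              (fun kv => !((((PySem.Dict.ofList d).items.map (fun kv => (kv.1, PySem.Set.ofList kv.2))).map Prod.fst).contains kv.1)) := by
      unfold merge_value_dicts_alt
      rw [List.reverse_cons, List.foldl_append, List.foldl_cons, List.foldl_nil]
    rw [haltcons, List.filter_append, List.append_assoc, List.filter_filter]
    have hmapmap : (((PySem.Dict.ofList d).items.map (fun kv => (kv.1, PySem.Set.ofList kv.2))).map Prod.fst)
        = (PySem.Dict.ofList d).items.map (fun kv => kv.1) := by
      rw [List.map_map]; rfl
    have hfilt : (merge_value_dicts_alt ds).filter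
          (fun kv => !((PySem.Dict.ofList d).items.foldl (fun r kv =>
              if r.contains kv.1 then r else r.insert kv.1 (PySem.Set.update PySem.Set.empty kv.2)) r).contains kv.1)
        = (merge_value_dicts_alt ds).filter
          (fun a => !r.contains a.1 &&
            !((((PySem.Dict.ofList d).items.map (fun kv => (kv.1, PySem.Set.ofList kv.2))).map Prod.fst).contains a.1)) := by
      apply List.filter_congr
      intro p _
      rw [contains_foldA, hmapmap, Bool.not_or]
    rw [hfilt]

-- ===== VERDICT (by name: the statement is the Claim_ definition above) =====
theorem merge_value_dicts_spec : Claim_equal_merge_value_dicts := by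
  intro dict_list _
  unfold Spec_merge_value_dicts merge_value_dicts
  rw [foldA_main _ _ PySem.Dict.nodup_keys_empty]
  simp [PySem.Dict.empty]
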